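-- pv_equiv track=rewrite | github.com/ai4curation/ai-gene-review | genes/SCHPO/pmp20/pmp20-bioinformatics/scripts/analyze_sequence_features.py | map_reference_position_to_query
-- ===== SOURCE A (Python) =====
-- def map_reference_position_to_query(
--     query_aln: str,
--     reference_aln: str,
--     reference_position: int,
-- ) -> tuple[int | None, str]:
--     query_index = 0
--     reference_index = 0
--
--     for query_residue, reference_residue in zip(query_aln, reference_aln):
--         if query_residue != "-":
--             query_index += 1
--         if reference_residue != "-":
--             reference_index += 1
--
--         if reference_residue != "-" and reference_index == reference_position:
--             if query_residue == "-":
--                 return None, "-"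
--             return query_index, query_residue
--
--     return None, "-"
-- ===== SOURCE B (Python) =====
-- def map_reference_position_to_query(
--     query_aln: str,
--     reference_aln: str,
--     reference_position: int,
-- ) -> tuple[int | None, str]:
--     # Locate-then-count: first find the alignment column holding the
--     # reference_position-th reference residue, then count query residues
--     # in the prefix up to (and including) that column.
--     cols = list(zip(query_aln, reference_aln))
--     col = None
--     seen = 0
--     for i, (_, r) in enumerate(cols):
--         if r != "-":
--             seen += 1
--             if seen == reference_position:
--                 col = i
--                 break
--     if col is None:
--         return None, "-"
--     q = cols[col][0]
--     if q == "-":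
--         return None, "-"
--     return sum(1 for qc, _ in cols[:col + 1] if qc != "-"), q
-- ===== Notes on version B (the rewrite author's own statement) =====
-- stated objective: alternative
-- what changed: Replaced the single interleaved pass that maintains both counters with a locate-then-count decomposition: first find the column of the reference_position-th reference residue, then count query non-gaps over the prefix up to that column.
import Mathlib
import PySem

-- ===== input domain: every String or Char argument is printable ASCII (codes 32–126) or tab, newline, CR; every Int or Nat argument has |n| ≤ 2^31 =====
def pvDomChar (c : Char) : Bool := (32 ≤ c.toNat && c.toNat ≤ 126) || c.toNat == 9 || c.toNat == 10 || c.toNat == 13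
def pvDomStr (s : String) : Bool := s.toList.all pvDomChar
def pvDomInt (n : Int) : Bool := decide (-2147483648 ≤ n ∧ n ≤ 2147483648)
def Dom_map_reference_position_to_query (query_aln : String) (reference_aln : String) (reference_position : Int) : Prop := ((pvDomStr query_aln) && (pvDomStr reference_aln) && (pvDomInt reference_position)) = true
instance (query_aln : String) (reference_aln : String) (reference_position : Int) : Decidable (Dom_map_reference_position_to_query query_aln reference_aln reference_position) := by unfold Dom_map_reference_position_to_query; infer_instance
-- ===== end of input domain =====

-- B replaces A's single interleaved counting pass with a locate-then-count
-- decomposition (find the target column, then count query residues up to it);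
-- same cost, alternative structure.

-- ===== PORT A =====
-- A's loop over zip(query_aln, reference_aln) with the two running counters.
def pvLoopA (pos : Int) : List (Char × Char) → Int → Int → Option Int × String
  | [], _, _ => (none, "-")
  | (q, r) :: rest, qi, ri =>
    let qi' := if q ≠ '-' then qi + 1 else qi
    let ri' := if r ≠ '-' then ri + 1 else ri
    if r ≠ '-' ∧ ri' = pos then
      (if q = '-' then (none, "-") else (some qi', String.mk [q]))
    else pvLoopA pos rest qi' ri'

def map_reference_position_to_query (query_aln : String) (reference_aln : String) (reference_position : Int) : Option Int × String :=
  pvLoopA reference_position (query_aln.toList.zip reference_aln.toList) 0 0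

-- ===== PORT B =====
-- B's first loop: find the column index of the reference_position-th reference residue.
def pvFindCol (pos : Int) : List (Char × Char) → Int → Nat → Option Nat
  | [], _, _ => none
  | (_, r) :: rest, seen, i =>
    if r ≠ '-' then
      (if seen + 1 = pos then some i else pvFindCol pos rest (seen + 1) (i + 1))
    else pvFindCol pos rest seen (i + 1)

def map_reference_position_to_query_alt (query_aln : String) (reference_aln : String) (reference_position : Int) : Option Int × String :=
  let cols := query_aln.toList.zip reference_aln.toList
  match pvFindCol reference_position cols 0 0 with
  | none => (none, "-")
  | some col =>
    let q := (cols.getD col (' ', ' ')).1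
    if q = '-' then (none, "-")
    else (some ((cols.take (col + 1)).countP (fun p => p.1 ≠ '-') : Int), String.mk [q])

-- ===== PRECONDITION & SPEC =====
def Spec_map_reference_position_to_query (query_aln : String) (reference_aln : String) (reference_position : Int) (out : Option Int × String) : Prop := out = map_reference_position_to_query_alt query_aln reference_aln reference_position
instance (query_aln : String) (reference_aln : String) (reference_position : Int) (out : Option Int × String) : Decidable (Spec_map_reference_position_to_query query_aln reference_aln reference_position out) := by unfold Spec_map_reference_position_to_query; infer_instance

-- ===== CLAIM (what is proved, stated in full; the proofs are below) =====
def Claim_equal_map_reference_position_to_query : Prop := ∀ (query_aln : String) (reference_aln : String) (reference_position : Int), Dom_map_reference_position_to_query query_aln reference_aln reference_position → Spec_map_reference_position_to_query query_aln reference_aln reference_position (map_reference_position_to_query query_aln reference_aln reference_position)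

-- ===== LEMMAS AND PROOFS =====

-- pvFindCol's index accumulator is a plain offset.
theorem pvFindCol_shift (pos : Int) (l : List (Char × Char)) :
    ∀ (seen : Int) (i : Nat), pvFindCol pos l seen i = (pvFindCol pos l seen 0).map (· + i) := by
  induction l with
  | nil => intro seen i; simp [pvFindCol]
  | cons hd tl ih =>
    intro seen i
    obtain ⟨q, r⟩ := hd
    by_cases hr : r ≠ '-'
    · by_cases hp : seen + 1 = pos
      · simp [pvFindCol, hr, hp]
      · simp only [pvFindCol, if_pos hr, if_neg hp]
        rw [ih (seen + 1) (i + 1), ih (seen + 1) 1]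
        cases pvFindCol pos tl (seen + 1) 0 <;> simp <;> omega
    · simp only [pvFindCol, if_neg hr]
      rw [ih seen (i + 1), ih seen 1]
      cases pvFindCol pos tl seen 0 <;> simp <;> omega

-- Main invariant: A's interleaved loop computes B's locate-then-count result,
-- with qi the number of query non-gaps already consumed.
theorem pvKey (pos : Int) (l : List (Char × Char)) :
    ∀ (qi ri : Int),
      pvLoopA pos l qi ri =
        match pvFindCol pos l ri 0 with
        | none => (none, "-")
        | some col =>
          if (l.getD col (' ', ' ')).1 = '-' then (none, "-")
          else (some (qi + ((l.take (col + 1)).countP (fun p => p.1 ≠ '-') : Int)),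
                String.mk [(l.getD col (' ', ' ')).1]) := by
  induction l with
  | nil => intro qi ri; simp [pvLoopA, pvFindCol]
  | cons hd tl ih =>
    intro qi ri
    obtain ⟨q, r⟩ := hd
    by_cases hr : r = '-'
    · -- reference gap: both sides recurse
      have hl : pvLoopA pos ((q, r) :: tl) qi ri
          = pvLoopA pos tl (if q = '-' then qi else qi + 1) ri := by
        simp [pvLoopA, hr]
      rw [hl, ih]
      have hf : pvFindCol pos ((q, r) :: tl) ri 0 = (pvFindCol pos tl ri 0).map (· + 1) := by
        rw [pvFindCol]; simp [hr]; exact pvFindCol_shift pos tl ri 1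
      rw [hf]
      cases hfc : pvFindCol pos tl ri 0 with
      | none => simp
      | some col =>
        simp only [Option.map_some]
        by_cases hq2 : (tl[col]?.getD (' ', ' ')).1 = '-'
        · simp [List.getD, hq2]
        · simp [List.getD, hq2, List.take_succ_cons, List.countP_cons, hr]
          by_cases hq : q = '-' <;> simp [hq] <;> push_cast <;> omega
    · by_cases hp : ri + 1 = pos
      · -- target column found here
        by_cases hq : q = '-'
        · simp [pvLoopA, pvFindCol, hr, hp, hq, List.getD]
        · simp [pvLoopA, pvFindCol, hr, hp, hq, List.getD, List.take_succ_cons,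
                List.countP_cons]
      · -- reference residue, not yet the target: both sides recurse
        have hl : pvLoopA pos ((q, r) :: tl) qi ri
            = pvLoopA pos tl (if q = '-' then qi else qi + 1) (ri + 1) := by
          simp [pvLoopA, hr, hp]
        rw [hl, ih]
        have hf : pvFindCol pos ((q, r) :: tl) ri 0
            = (pvFindCol pos tl (ri + 1) 0).map (· + 1) := by
          rw [pvFindCol]; simp [hr, hp]; exact pvFindCol_shift pos tl (ri + 1) 1
        rw [hf]
        cases hfc : pvFindCol pos tl (ri + 1) 0 with
        | none => simp
        | some col =>
          simp only [Option.map_some]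
          by_cases hq2 : (tl[col]?.getD (' ', ' ')).1 = '-'
          · simp [List.getD, hq2]
          · simp [List.getD, hq2, List.take_succ_cons, List.countP_cons, hr]
            by_cases hq : q = '-' <;> simp [hq] <;> push_cast <;> omega

-- ===== VERDICT (by name: the statement is the Claim_ definition above) =====
theorem map_reference_position_to_query_spec : Claim_equal_map_reference_position_to_query := by
  intro q r p _
  unfold Spec_map_reference_position_to_query map_reference_position_to_query map_reference_position_to_query_alt
  rw [pvKey]
  cases hfc : pvFindCol p (q.toList.zip r.toList) 0 0 <;> simp [hfc]
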